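-- pv_equiv track=rewrite | github.com/shrijacked/Cognisync | src/cognisync/corpus.py | pick_primary_artifact
-- ===== SOURCE A (Python) =====
-- from typing import Iterable, List, Optional, Set
--
-- def pick_primary_artifact(paths: List[str], source_kind: str) -> Optional[str]:
--     preferred_suffixes = {
--         "pdf": [".md", ".pdf"],
--         "url": [".md"],
--         "repo": [".md"],
--         "file": [".md", ".txt", ".rst"],
--     }.get(source_kind, [".md", ".txt", ".json", ".csv"])
--
--     for suffix in preferred_suffixes:
--         for path in paths:
--             if path.endswith(suffix):
--                 return path
--     return paths[0] if paths else None
-- ===== SOURCE B (Python) =====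
-- def pick_primary_artifact(paths, source_kind):
--     preferred_suffixes = {
--         "pdf": [".md", ".pdf"],
--         "url": [".md"],
--         "repo": [".md"],
--         "file": [".md", ".txt", ".rst"],
--     }.get(source_kind, [".md", ".txt", ".json", ".csv"])
--
--     def rank(p):
--         r = 0
--         for s in preferred_suffixes:
--             if p.endswith(s):
--                 return r
--             r += 1
--         return r
--
--     best = None
--     best_rank = len(preferred_suffixes) + 1
--     for p in paths:
--         r = rank(p)
--         if r < best_rank:
--             best, best_rank = p, r
--     return best
-- ===== Notes on version B (the rewrite author's own statement) =====
-- stated objective: alternative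
-- what changed: Replaced the suffix-outer/path-inner nested scan (with a separate paths[0] fallback) by a single pass over paths that tracks the earliest path of strictly minimum suffix-rank; non-matching paths rank past all suffixes so the first path realises the fallback.
import Mathlib
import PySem

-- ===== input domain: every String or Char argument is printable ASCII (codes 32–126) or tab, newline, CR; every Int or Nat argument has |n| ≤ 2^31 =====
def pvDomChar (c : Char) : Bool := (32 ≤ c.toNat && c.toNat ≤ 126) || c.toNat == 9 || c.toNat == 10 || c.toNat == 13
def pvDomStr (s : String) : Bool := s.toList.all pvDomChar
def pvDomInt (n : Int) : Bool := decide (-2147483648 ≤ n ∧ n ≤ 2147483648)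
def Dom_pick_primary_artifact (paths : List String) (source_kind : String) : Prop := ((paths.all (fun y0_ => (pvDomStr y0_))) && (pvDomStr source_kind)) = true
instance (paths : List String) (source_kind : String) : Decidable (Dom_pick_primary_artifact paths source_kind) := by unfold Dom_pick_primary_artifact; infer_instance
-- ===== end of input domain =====

-- B replaces A's suffix-outer/path-inner nested scan by a single argmin-by-rank pass over paths
-- (same cost; a different decomposition of the priority search).

-- the preferred-suffix table, identical in both Pythons ({...}.get(source_kind, default))
def pvPref (source_kind : String) : List String :=
  PySem.Dict.getD
    (PySem.Dict.ofList [("pdf", [".md", ".pdf"]), ("url", [".md"]),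
                        ("repo", [".md"]), ("file", [".md", ".txt", ".rst"])])
    source_kind [".md", ".txt", ".json", ".csv"]

-- ===== PORT A =====
-- inner 'for path in paths: if path.endswith(suffix): return path'
def pvAFind (paths : List String) (suffix : String) : Option String :=
  match paths with
  | [] => none
  | p :: rest => if PySem.Str.endswith p suffix then some p else pvAFind rest suffix

-- outer 'for suffix in preferred_suffixes: …'
def pvALoop (suffixes : List String) (paths : List String) : Option String :=
  match suffixes with
  | [] => none
  | s :: rest =>
    match pvAFind paths s with
    | some p => some p
    | none => pvALoop rest paths

def pick_primary_artifact (paths : List String) (source_kind : String) : Option String :=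
  match pvALoop (pvPref source_kind) paths with
  | some p => some p
  | none => match paths with
            | p :: _ => some p    -- 'paths[0] if paths else None'
            | [] => none

-- ===== PORT B =====
-- rank(p): index of the first suffix p ends with, len(suffixes) if none
def pvRank (suffixes : List String) (p : String) : Nat :=
  match suffixes with
  | [] => 0
  | s :: rest => if PySem.Str.endswith p s then 0 else pvRank rest p + 1

-- loop body: keep the strictly better-ranked path
def pvBStep (suffixes : List String) (acc : Option String × Nat) (p : String) : Option String × Nat :=
  let r := pvRank suffixes p
  if r < acc.2 then (some p, r) else acc

def pick_primary_artifact_alt (paths : List String) (source_kind : String) : Option String :=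
  let pref := pvPref source_kind
  (paths.foldl (pvBStep pref) (none, pref.length + 1)).1

-- ===== PRECONDITION & SPEC =====
def Spec_pick_primary_artifact (paths : List String) (source_kind : String) (out : Option String) : Prop := out = pick_primary_artifact_alt paths source_kind
instance (paths : List String) (source_kind : String) (out : Option String) : Decidable (Spec_pick_primary_artifact paths source_kind out) := by unfold Spec_pick_primary_artifact; infer_instance

-- ===== CLAIM (what is proved, stated in full; the proofs are below) =====
def Claim_equal_pick_primary_artifact : Prop := ∀ (paths : List String) (source_kind : String), Dom_pick_primary_artifact paths source_kind → Spec_pick_primary_artifact paths source_kind (pick_primary_artifact paths source_kind)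

-- ===== LEMMAS AND PROOFS =====

-- once the threshold is 0 the fold is frozen
theorem pvFold_zero (L : List String) (paths : List String) (b : Option String) :
    paths.foldl (pvBStep L) (b, 0) = (b, 0) := by
  induction paths with
  | nil => rfl
  | cons p rest ih => simpa [pvBStep]

-- rank = 0 iff the path ends with the head suffix
theorem pvRank_cons_eq_zero (s : String) (rest : List String) (p : String) :
    pvRank (s :: rest) p = 0 ↔ PySem.Str.endswith p s = true := by
  unfold pvRank
  by_cases h : PySem.Str.endswith p s = true <;> simp_all

-- proof helper: the first path of rank 0
def pvAFindZero (L : List String) (paths : List String) : Option String :=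
  match paths with
  | [] => none
  | q :: rest => if pvRank L q = 0 then some q else pvAFindZero L rest

theorem pvAFindZero_eq_find (s : String) (rest : List String) (paths : List String) :
    pvAFindZero (s :: rest) paths = pvAFind paths s := by
  induction paths with
  | nil => rfl
  | cons q qs ih =>
    simp only [pvAFindZero, pvAFind]
    by_cases h : PySem.Str.endswith q s = true
    · rw [if_pos ((pvRank_cons_eq_zero s rest q).mpr h), if_pos h]
    · rw [if_neg (fun hz => h ((pvRank_cons_eq_zero s rest q).mp hz)), if_neg h, ih]

theorem pvAFind_none (s : String) (paths : List String) (h : pvAFind paths s = none) :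
    ∀ q ∈ paths, PySem.Str.endswith q s = false := by
  induction paths with
  | nil => intro q hq; simp at hq
  | cons p rest ih =>
    intro q hq
    simp only [pvAFind] at h
    by_cases hp : PySem.Str.endswith p s = true
    · rw [if_pos hp] at h; exact absurd h (by simp)
    · rw [if_neg hp] at h
      rcases List.mem_cons.mp hq with rfl | hq'
      · exact eq_false_of_ne_true hp
      · exact ih h q hq'

-- if some path has rank 0, the fold (threshold ≥ 1) returns the first such path
theorem pvFold_first_zero (L : List String) :
    ∀ (paths : List String) (b : Option String) (r : Nat), 1 ≤ r →
    ∀ p, (pvAFindZero L paths = some p) →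
    paths.foldl (pvBStep L) (b, r) = (some p, 0) := by
  intro paths
  induction paths with
  | nil => intro b r _ p h; simp [pvAFindZero] at h
  | cons q rest ih =>
    intro b r hr p h
    by_cases hq : pvRank L q = 0
    · have : p = q := by simp [pvAFindZero, hq] at h; exact h.symm
      subst this
      simp [List.foldl, pvBStep, hq, Nat.lt_of_lt_of_le Nat.zero_lt_one hr, pvFold_zero]
    · have h' : pvAFindZero L rest = some p := by simpa [pvAFindZero, hq] using h
      simp only [List.foldl, pvBStep]
      split
      · exact ih _ _ (Nat.one_le_iff_ne_zero.mpr hq) p h'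
      · exact ih _ _ hr p h'

-- no path ends with s ⇒ ranks shift by one, and the fold with threshold+1 mirrors the fold on rest
theorem pvFold_shift (s : String) (rest : List String) :
    ∀ (paths : List String), (∀ q ∈ paths, PySem.Str.endswith q s = false) →
    ∀ (b : Option String) (r : Nat),
    paths.foldl (pvBStep (s :: rest)) (b, r + 1) =
      ((paths.foldl (pvBStep rest) (b, r)).1, (paths.foldl (pvBStep rest) (b, r)).2 + 1) := by
  intro paths
  induction paths with
  | nil => intro _ b r; rfl
  | cons q qs ih =>
    intro h b r
    have hq : PySem.Str.endswith q s = false := h q (List.mem_cons_self)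
    have hqs : ∀ x ∈ qs, PySem.Str.endswith x s = false := fun x hx => h x (List.mem_cons_of_mem _ hx)
    have hq' : PySem.Chars.endswith q.toList s.toList = false := by simpa using hq
    have hrk : pvRank (s :: rest) q = pvRank rest q + 1 := by simp [pvRank, hq']
    have step : pvBStep (s :: rest) (b, r + 1) q =
        ((pvBStep rest (b, r) q).1, (pvBStep rest (b, r) q).2 + 1) := by
      simp only [pvBStep, hrk]
      by_cases hlt : pvRank rest q < r
      · rw [if_pos (by omega), if_pos hlt]
      · rw [if_neg (by omega), if_neg hlt]
    rw [List.foldl_cons, List.foldl_cons, step, ih hqs _ _]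

-- main equivalence over an arbitrary suffix list
theorem pvMain (L : List String) (paths : List String) :
    (match pvALoop L paths with
     | some p => some p
     | none => match paths with | p :: _ => some p | [] => none) =
    (paths.foldl (pvBStep L) (none, L.length + 1)).1 := by
  induction L with
  | nil =>
    cases paths with
    | nil => rfl
    | cons p rest =>
      simp [pvALoop, List.foldl, pvBStep, pvRank, pvFold_zero]
  | cons s rest ih =>
    cases hf : pvAFind paths s with
    | some p =>
      have hz : pvAFindZero (s :: rest) paths = some p := pvAFindZero_eq_find s rest paths ▸ hf
      have := pvFold_first_zero (s :: rest) paths none (rest.length + 1 + 1) (by omega) p hz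
      simp [pvALoop, hf, this]
    | none =>
      have hnone : ∀ q ∈ paths, PySem.Str.endswith q s = false := pvAFind_none s paths hf
      have hshift := pvFold_shift s rest paths hnone none (rest.length + 1)
      simp only [pvALoop, hf, List.length_cons]
      rw [hshift, ← ih]

-- ===== VERDICT (by name: the statement is the Claim_ definition above) =====
theorem pick_primary_artifact_spec : Claim_equal_pick_primary_artifact := by
  intro paths source_kind _
  unfold Spec_pick_primary_artifact pick_primary_artifact pick_primary_artifact_alt
  exact pvMain (pvPref source_kind) paths
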